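-- pv_equiv track=rewrite | github.com/EliasAroni2000/automatas | Aroni-tp1-v2.py | tokenAbreParentesis
-- ===== SOURCE A (Python) =====
-- estado_final = "estado final"
--
-- estadoNoFinal = "estado no aceptado"
--
-- estadoTrampa = "estado trampa"
--
-- def tokenAbreParentesis(lexema):
--     estado = 0
--     estadoFinal = [1]
--     caracter = {0:{'(':1},1:{}}
--     for c in lexema:
--         if c in caracter[estado]:
--             estado = caracter[estado][c]
--         else:
--             estado = -1
--             break
--     if estado == -1:
--         return estadoTrampa
--     if estado in estadoFinal:
--         return estado_final
--     else:
--         return estadoNoFinal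
-- ===== SOURCE B (Python) =====
-- estado_final = "estado final"
-- estadoNoFinal = "estado no aceptado"
-- estadoTrampa = "estado trampa"
--
-- def tokenAbreParentesis(lexema):
--     chars = list(lexema)
--     if not chars:
--         return estadoNoFinal
--     if len(chars) == 1 and chars[0] == '(':
--         return estado_final
--     return estadoTrampa
-- ===== Notes on version B (the rewrite author's own statement) =====
-- stated objective: simpler
-- what changed: Replaced the DFA transition-table loop with a closed-form decision on length and content: empty -> not accepted, exactly '(' -> final, anything else -> trap.
import Mathlib
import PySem

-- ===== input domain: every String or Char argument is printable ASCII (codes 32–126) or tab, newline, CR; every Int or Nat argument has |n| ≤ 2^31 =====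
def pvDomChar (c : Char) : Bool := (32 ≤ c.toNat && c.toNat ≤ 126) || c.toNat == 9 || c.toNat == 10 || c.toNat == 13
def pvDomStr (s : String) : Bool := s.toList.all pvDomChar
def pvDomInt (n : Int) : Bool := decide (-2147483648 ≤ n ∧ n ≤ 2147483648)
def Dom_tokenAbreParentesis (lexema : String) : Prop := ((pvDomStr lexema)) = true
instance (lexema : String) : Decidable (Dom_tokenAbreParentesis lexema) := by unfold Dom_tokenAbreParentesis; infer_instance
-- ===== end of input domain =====

-- B replaces A's DFA transition-table loop by a closed-form decision on length/content; objective: simpler.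
-- ===== PORT A =====
-- the for-loop with break: returns the final value of `estado`
def tokALoop (caracter : PySem.Dict Int (PySem.Dict Char Int)) : List Char → Int → Int
  | [], estado => estado
  | c :: cs, estado =>
    match (caracter.getD estado PySem.Dict.empty).get? c with
    | some e' => tokALoop caracter cs e'
    | none => -1  -- estado = -1; break

def tokenAbreParentesis (lexema : String) : String :=
  let estado : Int := 0
  let estadoFinal : List Int := [1]
  let caracter : PySem.Dict Int (PySem.Dict Char Int) :=
    PySem.Dict.ofList [(0, PySem.Dict.ofList [('(', 1)]), (1, PySem.Dict.ofList [])]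
  let estado := tokALoop caracter lexema.toList estado
  if estado = -1 then "estado trampa"
  else if estado ∈ estadoFinal then "estado final"
  else "estado no aceptado"

-- ===== PORT B =====
def tokenAbreParentesis_alt (lexema : String) : String :=
  let chars := lexema.toList
  if chars.isEmpty then "estado no aceptado"
  else if chars.length = 1 ∧ chars[0]! = '(' then "estado final"
  else "estado trampa"

-- ===== PRECONDITION & SPEC =====
def Spec_tokenAbreParentesis (lexema : String) (out : String) : Prop := out = tokenAbreParentesis_alt lexema
instance (lexema : String) (out : String) : Decidable (Spec_tokenAbreParentesis lexema out) := by unfold Spec_tokenAbreParentesis; infer_instance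

-- ===== CLAIM (what is proved, stated in full; the proofs are below) =====
def Claim_equal_tokenAbreParentesis : Prop := ∀ (lexema : String), Dom_tokenAbreParentesis lexema → Spec_tokenAbreParentesis lexema (tokenAbreParentesis lexema)

-- ===== LEMMAS AND PROOFS =====
-- the transition rows of A's table, evaluated once
theorem caracGetD0 : (PySem.Dict.ofList ([(0, PySem.Dict.ofList [('(', 1)]), (1, PySem.Dict.ofList [])] : List (Int × PySem.Dict Char Int))).getD 0 PySem.Dict.empty = PySem.Dict.mk [('(', (1:Int))] := by decide

theorem caracGetD1 : (PySem.Dict.ofList ([(0, PySem.Dict.ofList [('(', 1)]), (1, PySem.Dict.ofList [])] : List (Int × PySem.Dict Char Int))).getD 1 PySem.Dict.empty = PySem.Dict.mk [] := by decide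

theorem tokenAbreParentesis_eq_alt (lexema : String) :
    tokenAbreParentesis lexema = tokenAbreParentesis_alt lexema := by
  unfold tokenAbreParentesis tokenAbreParentesis_alt
  rcases hl : lexema.toList with _ | ⟨c, _ | ⟨c', cs⟩⟩
  · simp [tokALoop]
  · by_cases hc : c = '('
    · subst hc; decide
    · have hc' : ¬ ('(' = c) := fun h => hc h.symm
      simp [tokALoop, caracGetD0, hc', hc, PySem.Dict.get?]
  · by_cases hc : c = '('
    · subst hc
      simp [tokALoop, caracGetD0, caracGetD1, PySem.Dict.get?]
    · have hc' : ¬ ('(' = c) := fun h => hc h.symm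
      simp [tokALoop, caracGetD0, hc', hc, PySem.Dict.get?]

-- ===== VERDICT (by name: the statement is the Claim_ definition above) =====
theorem tokenAbreParentesis_spec : Claim_equal_tokenAbreParentesis := by
  intro lexema _
  exact tokenAbreParentesis_eq_alt lexema
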